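-- pv_equiv track=rewrite | github.com/KARA-git/SHARP | sharp.py | colorize_text
-- ===== SOURCE A (Python) =====
-- ANSI_COLORS = ["31"]   # red
--
-- RESET = "\x1b[0m"
--
-- def colorize_text(text: str) -> str:
--     out_chars = []
--     idx = 0
--     for ch in text:
--         if ch == "\n":
--             out_chars.append(ch)
--             continue
--         color = ANSI_COLORS[idx % len(ANSI_COLORS)]
--         out_chars.append(f"\x1b[{color}m{ch}{RESET}")
--         idx += 1
--     return "".join(out_chars)
-- ===== SOURCE B (Python) =====
-- RESET = "\x1b[0m"
--
-- def colorize_text(text: str) -> str: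
--     # Every non-newline character gets the single color (red); newlines pass through.
--     # Split on newlines, wrap every character of each segment, rejoin with newlines.
--     segments = text.split("\n")
--     colored = ["".join(f"\x1b[31m{ch}{RESET}" for ch in seg) for seg in segments]
--     return "\n".join(colored)
-- ===== Notes on version B (the rewrite author's own statement) =====
-- stated objective: idiomatic
-- what changed: Drops the idx/modulo color-cycling bookkeeping (the color list is the singleton red) and replaces the per-character loop with its newline test by a split-on-newlines / wrap-each-character / rejoin-with-newlines decomposition.
import Mathlib
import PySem

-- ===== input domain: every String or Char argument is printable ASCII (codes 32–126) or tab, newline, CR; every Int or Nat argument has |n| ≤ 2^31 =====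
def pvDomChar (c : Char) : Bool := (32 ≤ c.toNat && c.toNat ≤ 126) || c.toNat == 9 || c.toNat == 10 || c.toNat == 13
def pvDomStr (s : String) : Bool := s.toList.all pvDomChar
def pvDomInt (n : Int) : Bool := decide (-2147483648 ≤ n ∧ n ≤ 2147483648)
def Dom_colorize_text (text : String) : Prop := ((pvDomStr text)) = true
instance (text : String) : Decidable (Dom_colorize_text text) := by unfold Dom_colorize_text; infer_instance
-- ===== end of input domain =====

-- B replaces A's per-character loop with idx/modulo color bookkeeping by a split-on-newline /
-- wrap-each-character / rejoin-with-newline decomposition (idiomatic; same behaviour).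

-- ===== PORT A =====
def ANSI_COLORS : List String := ["31"]

def RESET : String := "\x1b[0m"

def colorize_text (text : String) : String :=
  let st := text.toList.foldl
    (fun (st : List String × Int) ch =>
      if ch = '\n' then
        (st.1 ++ [String.ofList [ch]], st.2)
      else
        let color := (PySem.List.pyGet? ANSI_COLORS (PySem.Int.mod st.2 (ANSI_COLORS.length : Int))).getD ""
        (st.1 ++ [String.ofList ("\x1b[".toList ++ color.toList ++ "m".toList ++ [ch] ++ RESET.toList)],
         st.2 + 1))
    ([], 0)
  PySem.Str.join "" st.1

-- ===== PORT B =====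
def colorize_text_alt (text : String) : String :=
  let segments := PySem.Chars.splitOn text.toList ['\n']
  let colored := segments.map (fun seg =>
    PySem.Str.join "" (seg.map (fun ch => String.ofList ("\x1b[31m".toList ++ [ch] ++ RESET.toList))))
  PySem.Str.join "\n" colored

-- ===== PRECONDITION & SPEC =====
def Spec_colorize_text (text : String) (out : String) : Prop := out = colorize_text_alt text
instance (text : String) (out : String) : Decidable (Spec_colorize_text text out) := by unfold Spec_colorize_text; infer_instance

-- ===== CLAIM (what is proved, stated in full; the proofs are below) =====
def Claim_equal_colorize_text : Prop := ∀ (text : String), Dom_colorize_text text → Spec_colorize_text text (colorize_text text)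

-- ===== LEMMAS AND PROOFS =====

/-- The escape-wrapped form of one character. -/
def pvWrap (c : Char) : List Char := "\x1b[31m".toList ++ [c] ++ "\x1b[0m".toList

/-- Per-character semantics both programs realize. -/
def pvEmit (c : Char) : List Char := if c = '\n' then [c] else pvWrap c

/-- Reference split on '\n' (always returns a nonempty list of segments). -/
def pvSplit : List Char → List (List Char)
  | [] => [[]]
  | c :: rest =>
      if c = '\n' then [] :: pvSplit rest
      else
        match pvSplit rest with
        | [] => [[c]]      -- unreachable: pvSplit is never empty
        | h :: t => (c :: h) :: t

lemma pvSplit_ne_nil (cs : List Char) : pvSplit cs ≠ [] := by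
  cases cs with
  | nil => simp [pvSplit]
  | cons c rest =>
      simp only [pvSplit]
      split_ifs
      · simp
      · cases pvSplit rest <;> simp

lemma splitOn_go_eq (fuel : Nat) :
    ∀ (l cur : List Char) (acc : List (List Char)), l.length ≤ fuel →
      PySem.Chars.splitOn.go ['\n'] fuel l cur acc =
        acc.reverse ++ (match pvSplit l with
                        | [] => [cur.reverse]
                        | h :: t => (cur.reverse ++ h) :: t) := by
  induction fuel with
  | zero =>
      intro l cur acc hl
      have : l = [] := by cases l <;> simp_all
      subst this
      simp [PySem.Chars.splitOn.go, pvSplit]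
  | succ fuel ih =>
      intro l cur acc hl
      cases l with
      | nil => simp [PySem.Chars.splitOn.go, pvSplit]
      | cons c rest =>
          by_cases hc : c = '\n'
          · subst hc
            have hpre : List.isPrefixOf ['\n'] ('\n' :: rest) = true := by
              simp [List.isPrefixOf]
            rw [PySem.Chars.splitOn.go]
            simp only [hpre, if_pos, List.length_cons, List.length_nil, List.drop_succ_cons,
              List.drop_zero]
            rw [ih rest [] (cur.reverse :: acc) (by simpa using Nat.le_of_succ_le_succ hl)]
            cases hps : pvSplit rest with
            | nil => exact absurd hps (pvSplit_ne_nil rest)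
            | cons h t => simp [pvSplit, hps]
          · rw [PySem.Chars.splitOn.go]
            have hpre : List.isPrefixOf ['\n'] (c :: rest) = false := by
              simp [List.isPrefixOf]
              exact fun h => hc h.symm
            simp only [hpre, Bool.false_eq_true, if_false]
            rw [ih rest (c :: cur) acc (by simpa using Nat.le_of_succ_le_succ hl)]
            cases hps : pvSplit rest with
            | nil => exact absurd hps (pvSplit_ne_nil rest)
            | cons h t => simp [pvSplit, hps, hc]

lemma pvSplit_spec (cs : List Char) :
    PySem.Chars.splitOn cs ['\n'] = pvSplit cs := by
  have := splitOn_go_eq (cs.length + 1) cs [] [] (by omega)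
  rw [PySem.Chars.splitOn] at *
  rw [this]
  cases hps : pvSplit cs with
  | nil => exact absurd hps (pvSplit_ne_nil cs)
  | cons h t => simp

lemma join_empty_sep (xss : List (List Char)) :
    PySem.Chars.join [] xss = xss.flatten := by
  induction xss with
  | nil => simp [PySem.Chars.join_nil]
  | cons x t ih =>
      cases t with
      | nil => simp [PySem.Chars.join_singleton]
      | cons y t' => simp [PySem.Chars.join_cons_cons, ih]

lemma join_append_head (sep a x : List Char) (t : List (List Char)) :
    PySem.Chars.join sep ((a ++ x) :: t) = a ++ PySem.Chars.join sep (x :: t) := by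
  cases t with
  | nil => simp [PySem.Chars.join_singleton]
  | cons y t' => simp [PySem.Chars.join_cons_cons]

lemma pvWrap_lit (c : Char) :
    pvWrap c = ['\x1b', '[', '3', '1', 'm', c, '\x1b', '[', '0', 'm'] := by
  simp [pvWrap]

lemma pvJoin_split (cs : List Char) :
    PySem.Chars.join ['\n'] ((pvSplit cs).map (fun seg => seg.flatMap pvWrap)) = cs.flatMap pvEmit := by
  induction cs with
  | nil => simp [pvSplit, PySem.Chars.join_singleton]
  | cons c rest ih =>
      by_cases hc : c = '\n'
      · subst hc
        cases hps : pvSplit rest with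
        | nil => exact absurd hps (pvSplit_ne_nil rest)
        | cons h t =>
            rw [hps] at ih
            rw [show pvSplit ('\n' :: rest) = [] :: h :: t by simp [pvSplit, hps]]
            simp only [List.map_cons, List.flatMap_nil, PySem.Chars.join_cons_cons,
              List.nil_append]
            rw [← List.map_cons, ih]
            simp [pvEmit]
      · cases hps : pvSplit rest with
        | nil => exact absurd hps (pvSplit_ne_nil rest)
        | cons h t =>
            rw [hps] at ih
            simp only [pvSplit, if_neg hc, hps, List.map_cons, List.flatMap_cons]
            rw [join_append_head ['\n'] (pvWrap c) (h.flatMap pvWrap) ((t.map (fun seg => seg.flatMap pvWrap)))]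
            rw [← List.map_cons, ih]
            simp [pvEmit, hc]

lemma pvA_loop (cs : List Char) : ∀ (acc : List String) (idx : Int),
    (cs.foldl
      (fun (st : List String × Int) ch =>
        if ch = '\n' then
          (st.1 ++ [String.ofList [ch]], st.2)
        else
          let color := (PySem.List.pyGet? ANSI_COLORS (PySem.Int.mod st.2 (ANSI_COLORS.length : Int))).getD ""
          (st.1 ++ [String.ofList ("\x1b[".toList ++ color.toList ++ "m".toList ++ [ch] ++ RESET.toList)],
           st.2 + 1))
      (acc, idx)).1 = acc ++ cs.map (fun c => String.ofList (pvEmit c)) := by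
  induction cs with
  | nil => simp
  | cons c rest ih =>
      intro acc idx
      by_cases hc : c = '\n'
      · subst hc
        simp only [List.foldl_cons, reduceIte]
        rw [ih]
        simp [pvEmit]
      · simp only [List.foldl_cons, if_neg hc]
        rw [ih]
        simp [ANSI_COLORS, PySem.List.pyGet?, PySem.List.pyIdx?, pvEmit, pvWrap_lit, hc, RESET]

lemma str_eq_of_toList {s t : String} (h : s.toList = t.toList) : s = t := by
  have h2 := congrArg String.ofList h
  simpa using h2

lemma pvA_eq (text : String) :
    colorize_text text = String.ofList (text.toList.flatMap pvEmit) := by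
  simp only [colorize_text]
  rw [pvA_loop text.toList [] 0]
  apply str_eq_of_toList
  simp [PySem.Str.toList_join, join_empty_sep, List.flatMap_def, Function.comp_def]

lemma pvB_eq (text : String) :
    colorize_text_alt text = String.ofList (text.toList.flatMap pvEmit) := by
  simp only [colorize_text_alt]
  rw [pvSplit_spec]
  apply str_eq_of_toList
  simp only [PySem.Str.toList_join, List.map_map]
  have hinner : (fun seg => (PySem.Str.join "" (seg.map (fun ch => String.ofList ("\x1b[31m".toList ++ [ch] ++ RESET.toList)))).toList)
      = (fun seg : List Char => seg.flatMap pvWrap) := by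
    funext seg
    simp [PySem.Str.toList_join, join_empty_sep, List.flatMap_def, Function.comp_def, RESET]
    exact congrArg List.flatten (List.map_congr_left fun c _ => (pvWrap_lit c).symm)
  rw [show ((fun x => String.toList x) ∘ fun seg => PySem.Str.join "" (seg.map (fun ch => String.ofList ("\x1b[31m".toList ++ [ch] ++ RESET.toList)))) = (fun seg : List Char => seg.flatMap pvWrap) from hinner]
  rw [show ("\n".toList : List Char) = ['\n'] from rfl]
  rw [pvJoin_split]
  simp

-- ===== VERDICT (by name: the statement is the Claim_ definition above) =====
theorem colorize_text_spec : Claim_equal_colorize_text := by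
  intro text _
  unfold Spec_colorize_text
  rw [pvA_eq, pvB_eq]
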